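-- pv_equiv track=rewrite | github.com/finefine2/codetree-TILs | 250404/고대 문명 유적 탐사/ancient-ruin-exploration.py | count_clear
-- ===== SOURCE A (Python) =====
-- def bfs(board, visited, start_r, start_c, clear_mode):
--     from collections import deque
--
--     # 시작 위치의 값이 0이면 즉시 반환
--     if board[start_r][start_c] == 0:
--         return 0
--
--     q = deque([(start_r, start_c)])
--     connected = {(start_r, start_c)}
--     visited[start_r][start_c] = 1
--     target = board[start_r][start_c]
--
--     while q:
--         curr_r, curr_c = q.popleft()
--         for dr, dc in ((-1,0), (1,0), (0,-1), (0,1)):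
--             next_r, next_c = curr_r + dr, curr_c + dc
--             if (0 <= next_r < 5 and 0 <= next_c < 5 and
--                 visited[next_r][next_c] == 0 and
--                 board[next_r][next_c] == target):
--                 q.append((next_r, next_c))
--                 connected.add((next_r, next_c))
--                 visited[next_r][next_c] = 1
--
--     if len(connected) >= 3:
--         if clear_mode:
--             for r, c in connected:
--                 board[r][c] = 0
--         return len(connected)
--     return 0
--
-- def count_clear(board, clear_mode):
--     visited = [[0] * 5 for _ in range(5)]
--     total_count = 0
--
--     for r in range(5):
--         for c in range(5):
--             if visited[r][c] == 0:
--                 count = bfs(board, visited, r, c, clear_mode)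
--                 total_count += count
--
--     return total_count
-- ===== SOURCE B (Python) =====
-- # Alternative decomposition: instead of one BFS per unvisited start cell with a shared
-- # visited matrix (summing component sizes), compute for EACH cell its same-value
-- # connected region as a bounded set-fixpoint and count the cells lying in a region of
-- # size >= 3; performs the same in-place clearing of board as the original.
-- def count_clear(board, clear_mode):
--     offs = ((-1, 0), (1, 0), (0, -1), (0, 1))
--
--     def region(sr, sc):
--         target = board[sr][sc]
--         S = {(sr, sc)}
--         for _ in range(25):
--             S = S | {(r + dr, c + dc)
--                      for (r, c) in S for (dr, dc) in offs
--                      if 0 <= r + dr < 5 and 0 <= c + dc < 5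
--                      and board[r + dr][c + dc] == target}
--         return S
--
--     cells = [(r, c) for r in range(5) for c in range(5)]
--     big = [x for x in cells if board[x[0]][x[1]] != 0 and len(region(x[0], x[1])) >= 3]
--     if clear_mode:
--         for r, c in big:
--             board[r][c] = 0
--     return len(big)
-- ===== Notes on version B (the rewrite author's own statement) =====
-- stated objective: alternative
-- what changed: Replaces the per-start BFS flood fill (shared 5x5 visited matrix, deque, summing component sizes found component-by-component) by a per-cell bounded set-fixpoint: for every cell B grows its same-value region to a fixpoint and counts the cells whose region has size >= 3, with no visited matrix and no queue.
import Mathlib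
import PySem

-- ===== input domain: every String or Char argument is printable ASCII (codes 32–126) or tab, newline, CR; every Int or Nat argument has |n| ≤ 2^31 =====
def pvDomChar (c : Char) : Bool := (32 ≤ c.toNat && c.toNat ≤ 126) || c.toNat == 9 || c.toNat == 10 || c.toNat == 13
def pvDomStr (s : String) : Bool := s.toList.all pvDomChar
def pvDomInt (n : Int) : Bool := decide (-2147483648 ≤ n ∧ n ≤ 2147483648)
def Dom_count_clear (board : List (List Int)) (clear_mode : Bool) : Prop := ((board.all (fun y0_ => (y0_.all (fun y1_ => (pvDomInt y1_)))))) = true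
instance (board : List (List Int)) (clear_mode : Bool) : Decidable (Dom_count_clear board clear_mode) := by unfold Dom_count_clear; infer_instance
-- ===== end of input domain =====

-- B replaces the per-start BFS flood fill (shared visited matrix, queue, summed component
-- sizes) by a per-cell bounded set-fixpoint region computation, counting the cells that lie
-- in a same-value region of size ≥ 3 (objective: alternative, same return value).
-- Python A mutates `board` in place when clear_mode is set; Python B performs the same
-- mutation, but the equivalence proved here is about the RETURN value only.

-- ===== PORT A =====
-- board[r][c] (also used by port B): Pre_count_clear keeps every access in range,
-- so the getD default 0 is never taken.
def bget (b : List (List Int)) (r c : Int) : Int :=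
  PySem.List.pyGetD (PySem.List.pyGetD b r []) c 0

-- board[r][c] = w (indices are always in range at every use site)
def bset (b : List (List Int)) (r c w : Int) : List (List Int) :=
  PySem.List.pySetD b r (PySem.List.pySetD (PySem.List.pyGetD b r []) c w)

-- ((-1,0), (1,0), (0,-1), (0,1))
def pvDirs : List (Int × Int) := [(-1, 0), (1, 0), (0, -1), (0, 1)]

-- the body of the `for dr, dc in …` loop of bfs
def bfsStep (b : List (List Int)) (t : Int) (cur : Int × Int)
    (st : List (Int × Int) × PySem.Set (Int × Int) × List (List Int)) (d : Int × Int) :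
    List (Int × Int) × PySem.Set (Int × Int) × List (List Int) :=
  let nr := cur.1 + d.1
  let nc := cur.2 + d.2
  if 0 ≤ nr ∧ nr < 5 ∧ 0 ≤ nc ∧ nc < 5 ∧ bget st.2.2 nr nc = 0 ∧ bget b nr nc = t then
    (st.1 ++ [(nr, nc)], PySem.Set.add st.2.1 (nr, nc), bset st.2.2 nr nc 1)
  else st

-- the `while q:` loop; state (q, connected, visited); 30 units of fuel exceed the
-- proven bound of 25 on the number of iterations (lemma bfsLoop_spec), so the
-- fuel-exhausted branch is never reached
def bfsLoop (b : List (List Int)) (t : Int) :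
    Nat → List (Int × Int) → PySem.Set (Int × Int) → List (List Int) →
    PySem.Set (Int × Int) × List (List Int)
  | _, [], conn, vis => (conn, vis)
  | 0, _ :: _, conn, vis => (conn, vis)
  | fuel + 1, cur :: q, conn, vis =>
      let st := pvDirs.foldl (bfsStep b t cur) (q, conn, vis)
      bfsLoop b t fuel st.1 st.2.1 st.2.2

-- bfs; the Python mutates board/visited in place, the port returns (count, board, visited)
def bfs (b vis : List (List Int)) (sr sc : Int) (clear_mode : Bool) :
    Int × List (List Int) × List (List Int) :=
  if bget b sr sc = 0 then (0, b, vis)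
  else
    let t := bget b sr sc
    let res := bfsLoop b t 30 [(sr, sc)] (PySem.Set.ofList [(sr, sc)]) (bset vis sr sc 1)
    if 3 ≤ PySem.Set.len res.1 then
      (PySem.Set.len res.1,
       if clear_mode then res.1.foldl (fun bb x => bset bb x.1 x.2 0) b else b,
       res.2)
    else (0, b, res.2)

-- the body of the inner `for c in range(5):` loop; state (visited, board, total_count)
def visitCell (clear_mode : Bool)
    (st : List (List Int) × List (List Int) × Int) (r c : Int) :
    List (List Int) × List (List Int) × Int :=
  if bget st.1 r c = 0 then
    let res := bfs st.2.1 st.1 r c clear_mode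
    (res.2.2, res.2.1, st.2.2 + res.1)
  else st

def count_clear (board : List (List Int)) (clear_mode : Bool) : Int :=
  let visited := (PySem.List.pyRange 0 5).map (fun _ => List.replicate 5 (0 : Int))
  let st := (PySem.List.pyRange 0 5).foldl (fun st r =>
      (PySem.List.pyRange 0 5).foldl (fun st c => visitCell clear_mode st r c) st)
    (visited, board, 0)
  st.2.2

-- ===== PORT B =====
-- S | {in-bounds neighbours of members of S holding value t}
def altExpand (board : List (List Int)) (t : Int) (S : PySem.Set (Int × Int)) :
    PySem.Set (Int × Int) :=
  S.foldl (fun acc x =>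
    pvDirs.foldl (fun acc d =>
      let nr := x.1 + d.1
      let nc := x.2 + d.2
      if 0 ≤ nr ∧ nr < 5 ∧ 0 ≤ nc ∧ nc < 5 ∧ bget board nr nc = t then
        PySem.Set.add acc (nr, nc)
      else acc) acc) S

-- region(sr, sc): grow {(sr,sc)} 25 times
def altRegion (board : List (List Int)) (sr sc : Int) : PySem.Set (Int × Int) :=
  let t := bget board sr sc
  (PySem.List.pyRange 0 25).foldl (fun S _ => altExpand board t S)
    (PySem.Set.ofList [(sr, sc)])

-- [(r, c) for r in range(5) for c in range(5)]
def gridCells : List (Int × Int) :=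
  (PySem.List.pyRange 0 5).flatMap (fun r => (PySem.List.pyRange 0 5).map (fun c => (r, c)))

def count_clear_alt (board : List (List Int)) (clear_mode : Bool) : Int :=
  -- clear_mode only drives the in-place board mutation in Python, never the return value
  let big := gridCells.filter (fun x =>
    decide (bget board x.1 x.2 ≠ 0) &&
    decide (3 ≤ PySem.Set.len (altRegion board x.1 x.2)))
  (big.length : Int)


-- ===== PRECONDITION & SPEC =====
-- the first five rows exist and have at least five entries each (what range(5)-indexing needs)
def okB (b : List (List Int)) : Prop :=
  5 ≤ b.length ∧ ∀ i : Nat, i < 5 → 5 ≤ (b.getD i []).length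

-- Pre_ excludes exactly the boards on which Python A raises IndexError
-- (fewer than 5 rows, or one of the first five rows shorter than 5).
def Pre_count_clear (board : List (List Int)) (clear_mode : Bool) : Prop := okB board
instance (board : List (List Int)) (clear_mode : Bool) : Decidable (Pre_count_clear board clear_mode) := by
  unfold Pre_count_clear okB; infer_instance

def pvWitness_count_clear : List (List Int) × Bool :=
  ([[1, 1, 1, 0, 0], [0, 2, 0, 0, 0], [0, 2, 0, 0, 0], [0, 0, 0, 0, 0], [0, 0, 0, 0, 3]], true)

def Spec_count_clear (board : List (List Int)) (clear_mode : Bool) (out : Int) : Prop := out = count_clear_alt board clear_mode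
instance (board : List (List Int)) (clear_mode : Bool) (out : Int) : Decidable (Spec_count_clear board clear_mode out) := by unfold Spec_count_clear; infer_instance

-- ===== CLAIM (what is proved, stated in full; the proofs are below) =====
def Claim_equal_count_clear : Prop := ∀ (board : List (List Int)) (clear_mode : Bool), Dom_count_clear board clear_mode → Pre_count_clear board clear_mode → Spec_count_clear board clear_mode (count_clear board clear_mode)

-- ===== LEMMAS AND PROOFS =====

-- abstract view: cells, adjacency, same-value reachability w.r.t. the ORIGINAL board values
def inb (x : Int × Int) : Prop := 0 ≤ x.1 ∧ x.1 < 5 ∧ 0 ≤ x.2 ∧ x.2 < 5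

def nbr (x y : Int × Int) : Prop := ∃ d ∈ pvDirs, y = (x.1 + d.1, x.2 + d.2)

def stepP (v : Int × Int → Int) (t : Int) (x y : Int × Int) : Prop :=
  inb x ∧ inb y ∧ nbr x y ∧ v x = t ∧ v y = t

def reachP (v : Int × Int → Int) (t : Int) (s x : Int × Int) : Prop :=
  Relation.ReflTransGen (stepP v t) s x

-- the original board's value map
def v0 (bd : List (List Int)) (x : Int × Int) : Int := bget bd x.1 x.2

lemma nbr_symm {x y : Int × Int} (h : nbr x y) : nbr y x := by
  rcases h with ⟨d, hd, rfl⟩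
  simp only [pvDirs, List.mem_cons, List.not_mem_nil, or_false] at hd
  rcases hd with rfl | rfl | rfl | rfl
  · exact ⟨(1, 0), by simp [pvDirs], by simp⟩
  · exact ⟨(-1, 0), by simp [pvDirs], by simp⟩
  · exact ⟨(0, 1), by simp [pvDirs], by simp⟩
  · exact ⟨(0, -1), by simp [pvDirs], by simp⟩

lemma step_symm {v t} {x y : Int × Int} (h : stepP v t x y) : stepP v t y x :=
  ⟨h.2.1, h.1, nbr_symm h.2.2.1, h.2.2.2.2, h.2.2.2.1⟩

lemma reach_symmL {v t} {s x : Int × Int} (h : reachP v t s x) : reachP v t x s :=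
  Relation.ReflTransGen.symmetric (fun _ _ hab => step_symm hab) h

lemma reach_iff_of_reach {v t} {s y : Int × Int} (h : reachP v t s y) :
    ∀ x, reachP v t y x ↔ reachP v t s x :=
  fun _ => ⟨fun hx => Relation.ReflTransGen.trans h hx,
            fun hx => Relation.ReflTransGen.trans (reach_symmL h) hx⟩

lemma reach_mem {v t} {s x : Int × Int} (hs : inb s) (ht : v s = t) (h : reachP v t s x) :
    inb x ∧ v x = t := by
  induction h with
  | refl => exact ⟨hs, ht⟩
  | tail _ hstep _ => exact ⟨hstep.2.1, hstep.2.2.2.2⟩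

lemma reach_closed {v t} {s : Int × Int} (P : Int × Int → Prop) (hsP : P s)
    (hcl : ∀ x, P x → ∀ y, stepP v t x y → P y) : ∀ x, reachP v t s x → P x := by
  intro x h
  induction h with
  | refl => exact hsP
  | tail _ hstep ih => exact hcl _ ih _ hstep

lemma mem_gridCells (x : Int × Int) : x ∈ gridCells ↔ inb x := by
  cases x with
  | mk a b =>
    simp only [gridCells, List.mem_flatMap, List.mem_map, PySem.List.mem_pyRange_one, inb]
    constructor
    · rintro ⟨r, hr, c, hc, h⟩
      cases h
      exact ⟨hr.1, hr.2, hc.1, hc.2⟩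
    · rintro ⟨h1, h2, h3, h4⟩
      exact ⟨a, ⟨h1, h2⟩, b, ⟨h3, h4⟩, rfl⟩

lemma nodup_gridCells : gridCells.Nodup := by decide

lemma len_le_25 (L : List (Int × Int)) (h : L.Nodup) (hi : ∀ x ∈ L, inb x) :
    L.length ≤ 25 := by
  have hsub : L ⊆ gridCells := fun x hx => (mem_gridCells x).mpr (hi x hx)
  have := (List.subperm_of_subset h hsub).length_le
  simpa using this

-- 2D get/set lemmas
lemma okB_bset (b : List (List Int)) (hb : okB b) {r c : Int} (h : inb (r, c)) (w : Int) :
    okB (bset b r c w) := by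
  obtain ⟨hlen, hrow⟩ := hb
  obtain ⟨h1, h2, h3, h4⟩ := h
  simp only at h1 h2 h3 h4
  unfold bset
  rw [PySem.List.pySetD_of_nonneg _ _ h1, PySem.List.pyGetD_of_nonneg _ _ h1,
      PySem.List.pySetD_of_nonneg _ _ h3]
  refine ⟨by simpa using hlen, ?_⟩
  intro i hi
  rw [List.getD_eq_getElem?_getD, List.getElem?_set]
  by_cases hir : r.toNat = i
  · subst hir
    rw [if_pos rfl, if_pos (by omega)]
    simp only [Option.getD_some, List.length_set]
    rw [List.getD_eq_getElem?_getD] at *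
    have := hrow r.toNat hi
    cases hx : b[r.toNat]? with
    | none => simp [hx] at this
    | some row => simp [hx] at this ⊢; simpa using this
  · rw [if_neg hir, ← List.getD_eq_getElem?_getD]
    exact hrow i hi

lemma bget_bset (b : List (List Int)) (hb : okB b) {r c r' c' : Int} (h : inb (r, c))
    (h' : inb (r', c')) (w : Int) :
    bget (bset b r c w) r' c' = if r' = r ∧ c' = c then w else bget b r' c' := by
  obtain ⟨hlen, hrow⟩ := hb
  obtain ⟨h1, h2, h3, h4⟩ := h
  obtain ⟨h1', h2', h3', h4'⟩ := h'
  simp only at h1 h2 h3 h4 h1' h2' h3' h4'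
  have hrn : r.toNat < b.length := by omega
  unfold bget bset
  rw [PySem.List.pySetD_of_nonneg _ _ h1, PySem.List.pyGetD_of_nonneg _ _ h1,
      PySem.List.pySetD_of_nonneg _ _ h3, PySem.List.pyGetD_of_nonneg _ _ h1',
      PySem.List.pyGetD_of_nonneg _ _ h3', PySem.List.pyGetD_of_nonneg _ _ h1',
      PySem.List.pyGetD_of_nonneg _ _ h3']
  by_cases hrr : r' = r
  · subst hrr
    have : r'.toNat = r'.toNat := rfl
    rw [List.getD_eq_getElem?_getD (l := b.set _ _), List.getElem?_set_self (by omega),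
        Option.getD_some]
    by_cases hcc : c' = c
    · subst hcc
      rw [if_pos ⟨rfl, rfl⟩]
      have hc5 : c'.toNat < (b.getD r'.toNat []).length := by have := hrow r'.toNat (by omega); omega
      rw [List.getD_eq_getElem?_getD (l := (b.getD r'.toNat []).set _ _),
          List.getElem?_set_self (by omega), Option.getD_some]
    · rw [if_neg (by tauto)]
      rw [List.getD_eq_getElem?_getD (l := (b.getD r'.toNat []).set _ _),
          List.getElem?_set_ne (by omega), ← List.getD_eq_getElem?_getD]
  · rw [if_neg (by tauto)]
    rw [List.getD_eq_getElem?_getD (l := b.set _ _), List.getElem?_set_ne (by omega),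
        ← List.getD_eq_getElem?_getD]

-- generic growing-fold lemma
lemma foldl_grow {α β : Type} [BEq α] (f : List α → β → List α) (Q : β → α → Prop)
    (hf : ∀ a x y, y ∈ f a x ↔ (y ∈ a ∨ Q x y))
    (hg : ∀ a x, ∃ ex, f a x = a ++ ex)
    (hn : ∀ a x, a.Nodup → (f a x).Nodup) :
    ∀ (L : List β) (acc : List α),
      (∀ y, y ∈ L.foldl f acc ↔ y ∈ acc ∨ ∃ x ∈ L, Q x y) ∧
      (∃ ex, L.foldl f acc = acc ++ ex) ∧
      (acc.Nodup → (L.foldl f acc).Nodup) := by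
  intro L
  induction L with
  | nil => intro acc; simp
  | cons x L ih =>
    intro acc
    obtain ⟨ihm, ⟨ex, ihg⟩, ihn⟩ := ih (f acc x)
    refine ⟨?_, ?_, ?_⟩
    · intro y
      simp only [List.foldl_cons, ihm, hf, List.mem_cons]
      constructor
      · rintro ((h | h) | ⟨z, hz, h⟩)
        · exact Or.inl h
        · exact Or.inr ⟨x, Or.inl rfl, h⟩
        · exact Or.inr ⟨z, Or.inr hz, h⟩
      · rintro (h | ⟨z, (rfl | hz), h⟩)
        · exact Or.inl (Or.inl h)
        · exact Or.inl (Or.inr h)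
        · exact Or.inr ⟨z, hz, h⟩
    · obtain ⟨ex0, hg0⟩ := hg acc x
      refine ⟨ex0 ++ ex, ?_⟩
      rw [List.foldl_cons, ihg, hg0, List.append_assoc]
    · intro hacc
      simpa [List.foldl_cons] using ihn (hn acc x hacc)

-- B-side: one expansion
lemma altExpand_spec (bd : List (List Int)) (t : Int) (S : PySem.Set (Int × Int)) :
    (∀ y, y ∈ altExpand bd t S ↔ y ∈ S ∨ ∃ x ∈ S, nbr x y ∧ inb y ∧ bget bd y.1 y.2 = t) ∧
    (∃ ex, altExpand bd t S = S ++ ex) ∧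
    (S.Nodup → (altExpand bd t S).Nodup) := by
  have inner := fun (x : Int × Int) => foldl_grow
    (fun (acc : PySem.Set (Int × Int)) (d : Int × Int) =>
      if 0 ≤ x.1 + d.1 ∧ x.1 + d.1 < 5 ∧ 0 ≤ x.2 + d.2 ∧ x.2 + d.2 < 5 ∧
          bget bd (x.1 + d.1) (x.2 + d.2) = t then
        PySem.Set.add acc (x.1 + d.1, x.2 + d.2)
      else acc)
    (fun (d y : Int × Int) => (0 ≤ x.1 + d.1 ∧ x.1 + d.1 < 5 ∧ 0 ≤ x.2 + d.2 ∧ x.2 + d.2 < 5 ∧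
          bget bd (x.1 + d.1) (x.2 + d.2) = t) ∧ y = (x.1 + d.1, x.2 + d.2))
    (by
      intro a d y
      dsimp only
      split_ifs with hc
      · simp [PySem.Set.mem_add, hc]
      · simp [hc])
    (by
      intro a d
      dsimp only
      split_ifs with hc
      · rw [PySem.Set.add_eq_ite]
        split_ifs with hm
        · exact ⟨[], by simp⟩
        · exact ⟨_, rfl⟩
      · exact ⟨[], by simp⟩)
    (by intro a d ha; dsimp only; split_ifs; exacts [PySem.Set.nodup_add _ _ ha, ha])
  have outer := foldl_grow
    (fun (acc : PySem.Set (Int × Int)) (x : Int × Int) =>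
      pvDirs.foldl (fun acc d =>
        if 0 ≤ x.1 + d.1 ∧ x.1 + d.1 < 5 ∧ 0 ≤ x.2 + d.2 ∧ x.2 + d.2 < 5 ∧
            bget bd (x.1 + d.1) (x.2 + d.2) = t then
          PySem.Set.add acc (x.1 + d.1, x.2 + d.2)
        else acc) acc)
    (fun (x y : Int × Int) => ∃ d ∈ pvDirs, (0 ≤ x.1 + d.1 ∧ x.1 + d.1 < 5 ∧ 0 ≤ x.2 + d.2 ∧
        x.2 + d.2 < 5 ∧ bget bd (x.1 + d.1) (x.2 + d.2) = t) ∧ y = (x.1 + d.1, x.2 + d.2))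
    (fun a x y => ((inner x pvDirs a).1 y))
    (fun a x => (inner x pvDirs a).2.1)
    (fun a x ha => (inner x pvDirs a).2.2 ha)
    S S
  obtain ⟨hm, hg, hn⟩ := outer
  have hQ : ∀ (x y : Int × Int),
      ((∃ d ∈ pvDirs, (0 ≤ x.1 + d.1 ∧ x.1 + d.1 < 5 ∧ 0 ≤ x.2 + d.2 ∧
        x.2 + d.2 < 5 ∧ bget bd (x.1 + d.1) (x.2 + d.2) = t) ∧ y = (x.1 + d.1, x.2 + d.2))
      ↔ (nbr x y ∧ inb y ∧ bget bd y.1 y.2 = t)) := by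
    intro x y
    constructor
    · rintro ⟨d, hd, ⟨b1, b2, b3, b4, b5⟩, rfl⟩
      exact ⟨⟨d, hd, rfl⟩, ⟨b1, b2, b3, b4⟩, b5⟩
    · rintro ⟨⟨d, hd, rfl⟩, hy, hv⟩
      exact ⟨d, hd, ⟨hy.1, hy.2.1, hy.2.2.1, hy.2.2.2, hv⟩, rfl⟩
  refine ⟨?_, hg, hn⟩
  · intro y
    rw [show altExpand bd t S = S.foldl _ S from rfl, hm y]
    constructor
    · rintro (h | ⟨x, hx, hq⟩)
      · exact Or.inl h
      · exact Or.inr ⟨x, hx, (hQ x y).mp hq⟩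
    · rintro (h | ⟨x, hx, hq⟩)
      · exact Or.inl h
      · exact Or.inr ⟨x, hx, (hQ x y).mpr hq⟩

lemma foldl_const_iterate {α γ : Type} (F : α → α) (L : List γ) (S : α) :
    L.foldl (fun S _ => F S) S = F^[L.length] S := by
  induction L generalizing S with
  | nil => rfl
  | cons x L ih => simpa [Function.iterate_succ_apply] using ih (F S)

-- B-side: the 25-fold iteration reaches exactly the reachable set
lemma altRegion_spec (bd : List (List Int)) (s : Int × Int) (hs : inb s) :
    (altRegion bd s.1 s.2).Nodup ∧
    (∀ x, x ∈ altRegion bd s.1 s.2 ↔ reachP (v0 bd) (v0 bd s) s x) := by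
  set v := v0 bd with hv
  set t := bget bd s.1 s.2 with htdef
  have hts : v s = t := rfl
  set F := altExpand bd t with hF
  have hreg : altRegion bd s.1 s.2 = F^[25] [s] := by
    rw [altRegion]
    rw [foldl_const_iterate, ← htdef, ← hF,
        show (PySem.List.pyRange 0 25).length = 25 by decide,
        PySem.Set.ofList_eq_self_of_nodup _ (by simp), Prod.mk.eta]
  -- invariant: Nodup ∧ all reachable ∧ s ∈ ·
  have hinv : ∀ k : Nat, (F^[k] [s]).Nodup ∧ (∀ x ∈ F^[k] [s], reachP v t s x) ∧
      s ∈ F^[k] [s] := by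
    intro k
    induction k with
    | zero =>
      refine ⟨List.nodup_singleton s, ?_, by simp⟩
      intro x hx
      rw [Function.iterate_zero_apply, List.mem_singleton] at hx
      exact hx ▸ Relation.ReflTransGen.refl
    | succ k ih =>
      obtain ⟨hnd, hr, hsm⟩ := ih
      obtain ⟨hm, hg, hn⟩ := altExpand_spec bd t (F^[k] [s])
      rw [← hF] at hm hn
      rw [Function.iterate_succ_apply']
      refine ⟨hn hnd, ?_, (hm s).mpr (Or.inl hsm)⟩
      intro y hy
      rcases (hm y).mp hy with h | ⟨x, hx, hnb, hib, hbv⟩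
      · exact hr y h
      · have hx' := hr x hx
        have hxm := reach_mem hs hts hx'
        exact hx'.tail ⟨hxm.1, hib, hnb, hxm.2, hbv⟩
  -- fixpoint after 25 steps
  have hfix : F (F^[25] [s]) = F^[25] [s] := by
    have key : ∀ k : Nat, F (F^[k] [s]) = F^[k] [s] ∨ k + 1 ≤ (F^[k] [s]).length := by
      intro k
      induction k with
      | zero => right; simp
      | succ k ih =>
        rcases ih with hfx | hlen
        · left
          rw [Function.iterate_succ_apply', hfx, hfx]
        · obtain ⟨ex, hex⟩ := (altExpand_spec bd t (F^[k] [s])).2.1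
          rw [← hF] at hex
          cases ex with
          | nil =>
            left
            have hfx : F (F^[k] [s]) = F^[k] [s] := by simpa using hex
            rw [Function.iterate_succ_apply', hfx, hfx]
          | cons e ex =>
            right
            rw [Function.iterate_succ_apply', hex]
            simp only [List.length_append, List.length_cons]
            omega
    rcases key 25 with h | h
    · exact h
    · exfalso
      have h25 := len_le_25 (F^[25] [s]) (hinv 25).1
        (fun x hx => (reach_mem hs hts ((hinv 25).2.1 x hx)).1)
      omega
  refine ⟨hreg ▸ (hinv 25).1, ?_⟩
  intro x
  rw [hreg]
  constructor
  · exact fun h => (hinv 25).2.1 x h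
  · refine reach_closed (fun y => y ∈ F^[25] [s]) (hinv 25).2.2 ?_ x
    intro a ha y hstep
    obtain ⟨hm, _, _⟩ := altExpand_spec bd t (F^[25] [s])
    rw [← hF] at hm
    have : y ∈ F (F^[25] [s]) := (hm y).mpr (Or.inr ⟨a, ha, hstep.2.2.1, hstep.2.1, hstep.2.2.2.2⟩)
    rwa [hfix] at this

-- A-side invariant pieces
def AMark (V0 : Int × Int → Prop) (vis : List (List Int)) (C : List (Int × Int)) : Prop :=
  ∀ x : Int × Int, inb x → (bget vis x.1 x.2 = 0 ↔ ¬ (V0 x ∨ x ∈ C))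

def ADef (v : Int × Int → Int) (t : Int) (V0 : Int × Int → Prop)
    (q C : List (Int × Int)) : Prop :=
  ∀ x ∈ C, x ∈ q ∨ ∀ y, stepP v t x y → (V0 y ∨ y ∈ C)

lemma bfsStep_go (b : List (List Int)) (v : Int × Int → Int) (t : Int) (s cur : Int × Int)
    (V0 : Int × Int → Prop)
    (hb : ∀ x : Int × Int, inb x → ¬ V0 x → bget b x.1 x.2 = v x)
    (hs : inb s) (ht : v s = t) (hcur : reachP v t s cur) :
    ∀ (D : List (Int × Int)), (∀ d ∈ D, d ∈ pvDirs) →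
    ∀ (q C : List (Int × Int)) (vis : List (List Int)),
      C.Nodup → (∀ x ∈ C, reachP v t s x) → okB vis → AMark V0 vis C →
      ∃ (new : List (Int × Int)) (vis' : List (List Int)),
        D.foldl (bfsStep b t cur) (q, C, vis) = (q ++ new, C ++ new, vis') ∧
        (C ++ new).Nodup ∧ (∀ x ∈ C ++ new, reachP v t s x) ∧ okB vis' ∧
        AMark V0 vis' (C ++ new) ∧
        (∀ d ∈ D, ∀ y : Int × Int, stepP v t cur y → y = (cur.1 + d.1, cur.2 + d.2) →
          (V0 y ∨ y ∈ C ++ new)) := by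
  intro D
  induction D with
  | nil =>
    intro _ q C vis h1 h2 h3 h4
    refine ⟨[], vis, by simp, by simpa using h1, by simpa using h2, h3, ?_, by simp⟩
    simpa using h4
  | cons d D ih =>
    intro hD q C vis hnd hreach hok hmark
    have hdmem : d ∈ pvDirs := hD d (List.mem_cons_self ..)
    rw [List.foldl_cons]
    by_cases hcond : 0 ≤ cur.1 + d.1 ∧ cur.1 + d.1 < 5 ∧ 0 ≤ cur.2 + d.2 ∧ cur.2 + d.2 < 5 ∧
        bget vis (cur.1 + d.1) (cur.2 + d.2) = 0 ∧ bget b (cur.1 + d.1) (cur.2 + d.2) = t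
    · -- the neighbour is added
      set y : Int × Int := (cur.1 + d.1, cur.2 + d.2) with hy
      have hyinb : inb y := ⟨hcond.1, hcond.2.1, hcond.2.2.1, hcond.2.2.2.1⟩
      have hyun : ¬ (V0 y ∨ y ∈ C) := (hmark y hyinb).mp hcond.2.2.2.2.1
      have hynotC : y ∉ C := fun h => hyun (Or.inr h)
      have hynotV : ¬ V0 y := fun h => hyun (Or.inl h)
      have hvy : v y = t := by
        rw [← hb y hyinb hynotV]; exact hcond.2.2.2.2.2
      have hcm := reach_mem hs ht hcur
      have hystep : stepP v t cur y := ⟨hcm.1, hyinb, ⟨d, hdmem, rfl⟩, hcm.2, hvy⟩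
      have hstep1 : bfsStep b t cur (q, C, vis) d =
          (q ++ [y], C ++ [y], bset vis y.1 y.2 1) := by
        simp only [bfsStep]
        rw [if_pos hcond]
        rw [PySem.Set.add_of_not_mem hynotC]
      rw [hstep1]
      have hmark' : AMark V0 (bset vis y.1 y.2 1) (C ++ [y]) := by
        intro x hx
        rw [bget_bset vis hok hyinb hx 1]
        by_cases hxy : x = y
        · subst hxy
          rw [if_pos (⟨rfl, rfl⟩ : y.1 = y.1 ∧ y.2 = y.2)]
          simp
        · have : ¬ (x.1 = y.1 ∧ x.2 = y.2) := by
            intro hc; exact hxy (Prod.ext hc.1 hc.2)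
          rw [if_neg this]
          rw [hmark x hx]
          simp only [List.mem_append, List.mem_singleton]
          constructor
          · intro h hc
            rcases hc with h0 | h0 | h0
            exacts [h (Or.inl h0), h (Or.inr h0), hxy h0]
          · intro h hc
            rcases hc with h0 | h0
            exacts [h (Or.inl h0), h (Or.inr (Or.inl h0))]
      obtain ⟨new, vis', heq, h1, h2, h3, h4, h5⟩ :=
        ih (fun e he => hD e (List.mem_cons_of_mem _ he)) (q ++ [y]) (C ++ [y])
          (bset vis y.1 y.2 1)
          (by
            rw [List.nodup_append]
            refine ⟨hnd, List.nodup_singleton y, ?_⟩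
            have hdj : ∀ (a bb : ℤ), (a, bb) ∈ C → ¬(a, bb) = y :=
              fun a bb hab hEq => hynotC (hEq ▸ hab)
            simpa using hdj)
          (by
            intro x hx
            rcases List.mem_append.mp hx with h | h
            · exact hreach x h
            · rw [List.mem_singleton] at h
              exact h ▸ hcur.tail hystep)
          (okB_bset vis hok hyinb 1) hmark'
      refine ⟨[y] ++ new, vis', ?_, ?_, ?_, h3, ?_, ?_⟩
      · rw [heq]; simp
      · simpa [List.append_assoc] using h1
      · intro x hx
        apply h2
        simpa [List.append_assoc] using hx
      · intro x hx
        rw [h4 x hx]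
        simp [List.append_assoc]
      · intro e he z hz hze
        rcases List.mem_cons.mp he with rfl | he'
        · right
          rw [← hy] at hze
          subst hze
          simp
        · have := h5 e he' z hz hze
          rcases this with h | h
          · exact Or.inl h
          · right; simpa [List.append_assoc] using h
    · -- nothing added for this direction
      have hstep1 : bfsStep b t cur (q, C, vis) d = (q, C, vis) := by
        simp only [bfsStep]
        rw [if_neg hcond]
      rw [hstep1]
      obtain ⟨new, vis', heq, h1, h2, h3, h4, h5⟩ :=
        ih (fun e he => hD e (List.mem_cons_of_mem _ he)) q C vis hnd hreach hok hmark
      refine ⟨new, vis', heq, h1, h2, h3, h4, ?_⟩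
      intro e he z hz hze
      rcases List.mem_cons.mp he with rfl | he'
      · -- the condition failed although z is a valid step: z must be already marked
        subst hze
        have hzinb : inb (cur.1 + e.1, cur.2 + e.2) := hz.2.1
        by_cases hV : V0 (cur.1 + e.1, cur.2 + e.2)
        · exact Or.inl hV
        · by_cases hvis0 : bget vis (cur.1 + e.1) (cur.2 + e.2) = 0
          · exfalso
            apply hcond
            refine ⟨hzinb.1, hzinb.2.1, hzinb.2.2.1, hzinb.2.2.2, hvis0, ?_⟩
            rw [hb _ hzinb hV]
            exact hz.2.2.2.2
          · have := (hmark _ hzinb)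
            have hm : V0 (cur.1 + e.1, cur.2 + e.2) ∨ (cur.1 + e.1, cur.2 + e.2) ∈ C := by
              by_contra hc
              exact hvis0 (this.mpr hc)
            rcases hm with h | h
            · exact Or.inl h
            · exact Or.inr (List.mem_append.mpr (Or.inl h))
      · exact h5 e he' z hz hze

lemma bfsLoop_spec (b : List (List Int)) (v : Int × Int → Int) (t : Int) (s : Int × Int)
    (V0 : Int × Int → Prop)
    (hb : ∀ x : Int × Int, inb x → ¬ V0 x → bget b x.1 x.2 = v x)
    (hs : inb s) (ht : v s = t)
    (hdisj : ∀ x, reachP v t s x → ¬ V0 x) :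
    ∀ (fuel : Nat) (q C : List (Int × Int)) (vis : List (List Int)),
      q.length + (25 - C.length) ≤ fuel →
      C.Nodup → (∀ x ∈ C, reachP v t s x) → (∀ x ∈ q, x ∈ C) → s ∈ C →
      okB vis → AMark V0 vis C → ADef v t V0 q C →
      ∃ (Cf : List (Int × Int)) (vis' : List (List Int)),
        bfsLoop b t fuel q C vis = (Cf, vis') ∧ Cf.Nodup ∧
        (∀ x, x ∈ Cf ↔ reachP v t s x) ∧ okB vis' ∧ AMark V0 vis' Cf := by
  intro fuel
  induction fuel with
  | zero =>
    intro q C vis hfuel hnd hreach hq hsC hok hmark hdef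
    cases q with
    | cons a q => simp at hfuel
    | nil =>
      refine ⟨C, vis, rfl, hnd, ?_, hok, hmark⟩
      intro x
      constructor
      · exact fun h => hreach x h
      · refine reach_closed (fun z => z ∈ C) hsC ?_ x
        intro a ha y hstep
        rcases hdef a ha with h | h
        · simp at h
        · rcases h y hstep with hV | hC
          · exfalso
            have hra : reachP v t s a := hreach a ha
            exact hdisj y (hra.tail hstep) hV
          · exact hC
  | succ fuel ih =>
    intro q C vis hfuel hnd hreach hq hsC hok hmark hdef
    cases q with
    | nil =>
      refine ⟨C, vis, rfl, hnd, ?_, hok, hmark⟩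
      intro x
      constructor
      · exact fun h => hreach x h
      · refine reach_closed (fun z => z ∈ C) hsC ?_ x
        intro a ha y hstep
        rcases hdef a ha with h | h
        · simp at h
        · rcases h y hstep with hV | hC
          · exfalso
            have hra : reachP v t s a := hreach a ha
            exact hdisj y (hra.tail hstep) hV
          · exact hC
    | cons cur rest =>
      have hcurC : cur ∈ C := hq cur (List.mem_cons_self ..)
      have hcur : reachP v t s cur := hreach cur hcurC
      obtain ⟨new, vis', heq, hnd', hreach', hok', hmark', hpost⟩ :=
        bfsStep_go b v t s cur V0 hb hs ht hcur pvDirs (fun _ h => h) rest C vis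
          hnd hreach hok hmark
      have hloop : bfsLoop b t (fuel + 1) (cur :: rest) C vis =
          bfsLoop b t fuel (rest ++ new) (C ++ new) vis' := by
        rw [bfsLoop]
        rw [heq]
      rw [hloop]
      have hinb' : ∀ x ∈ C ++ new, inb x := fun x hx => (reach_mem hs ht (hreach' x hx)).1
      have hlen' : (C ++ new).length ≤ 25 := len_le_25 _ hnd' hinb'
      apply ih (rest ++ new) (C ++ new) vis' ?_ hnd' hreach' ?_ ?_ hok' hmark' ?_
      · simp only [List.length_append, List.length_cons] at hfuel hlen' ⊢
        omega
      · intro x hx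
        rcases List.mem_append.mp hx with h | h
        · exact List.mem_append.mpr (Or.inl (hq x (List.mem_cons_of_mem _ h)))
        · exact List.mem_append.mpr (Or.inr h)
      · exact List.mem_append.mpr (Or.inl hsC)
      · intro x hx
        rcases List.mem_append.mp hx with hxC | hxNew
        · rcases hdef x hxC with hxq | hcl
          · rcases List.mem_cons.mp hxq with rfl | hxrest
            · right
              intro y hstep
              obtain ⟨d, hd, hyd⟩ := hstep.2.2.1
              exact hpost d hd y hstep hyd
            · left; exact List.mem_append.mpr (Or.inl hxrest)
          · right
            intro y hstep
            rcases hcl y hstep with h | h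
            · exact Or.inl h
            · exact Or.inr (List.mem_append.mpr (Or.inl h))
        · left; exact List.mem_append.mpr (Or.inr hxNew)

lemma clear_fold (L : List (Int × Int)) :
    ∀ b : List (List Int), okB b → (∀ z ∈ L, inb z) →
      okB (L.foldl (fun bb x => bset bb x.1 x.2 0) b) ∧
      (∀ x : Int × Int, inb x → x ∉ L →
        bget (L.foldl (fun bb x => bset bb x.1 x.2 0) b) x.1 x.2 = bget b x.1 x.2) := by
  induction L with
  | nil => intro b hok _; exact ⟨hok, fun _ _ _ => rfl⟩
  | cons z L ih =>
    intro b hok hz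
    have hzin : inb z := hz z (List.mem_cons_self ..)
    have hzin' : inb (z.1, z.2) := hzin
    have hok1 : okB (bset b z.1 z.2 0) := okB_bset b hok hzin' 0
    obtain ⟨ih1, ih2⟩ := ih (bset b z.1 z.2 0) hok1 (fun w hw => hz w (List.mem_cons_of_mem _ hw))
    refine ⟨by simpa using ih1, ?_⟩
    intro x hx hxL
    have hxz : x ≠ z := fun h => hxL (h ▸ List.mem_cons_self ..)
    have hxL' : x ∉ L := fun h => hxL (List.mem_cons_of_mem _ h)
    have step2 := ih2 x hx hxL'
    simp only [List.foldl_cons]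
    rw [step2, bget_bset b hok hzin' hx 0, if_neg]
    intro hc
    exact hxz (Prod.ext hc.1 hc.2)

set_option maxHeartbeats 1000000 in
lemma bfs_spec (bd b vis : List (List Int)) (V0 : Int × Int → Prop) (s : Int × Int)
    (cm : Bool)
    (hvisOk : okB vis) (hbOk : okB b)
    (hmark : ∀ x : Int × Int, inb x → (bget vis x.1 x.2 = 0 ↔ ¬ V0 x))
    (hb : ∀ x : Int × Int, inb x → ¬ V0 x → bget b x.1 x.2 = v0 bd x)
    (hs : inb s) (hns : ¬ V0 s) (hnz : v0 bd s ≠ 0)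
    (hdisj : ∀ x, reachP (v0 bd) (v0 bd s) s x → ¬ V0 x) :
    ∃ (Cf : List (Int × Int)) (b' vis' : List (List Int)),
      bfs b vis s.1 s.2 cm =
        ((if 3 ≤ Cf.length then (Cf.length : Int) else 0), b', vis') ∧
      Cf.Nodup ∧ (∀ x, x ∈ Cf ↔ reachP (v0 bd) (v0 bd s) s x) ∧
      okB vis' ∧ (∀ x : Int × Int, inb x → (bget vis' x.1 x.2 = 0 ↔ ¬ (V0 x ∨ x ∈ Cf))) ∧
      okB b' ∧ (∀ x : Int × Int, inb x → ¬ V0 x → x ∉ Cf → bget b' x.1 x.2 = v0 bd x) := by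
  have hbs : bget b s.1 s.2 = v0 bd s := hb s hs hns
  have hmark0 : AMark V0 (bset vis s.1 s.2 1) [s] := by
    intro x hx
    rw [bget_bset vis hvisOk hs hx 1]
    by_cases hxy : x = s
    · subst hxy
      rw [if_pos ⟨rfl, rfl⟩]
      simp
    · rw [if_neg (fun hc => hxy (Prod.ext hc.1 hc.2))]
      rw [hmark x hx]
      simp only [List.mem_singleton]
      constructor
      · intro h hc
        rcases hc with h0 | h0
        exacts [h h0, hxy h0]
      · intro h hc
        exact h (Or.inl hc)
  obtain ⟨Cf, vis', hloop, hnd, hmem, hok', hmark'⟩ :=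
    bfsLoop_spec b (v0 bd) (v0 bd s) s V0 hb hs rfl hdisj 30 [s] [s]
      (bset vis s.1 s.2 1)
      (by simp)
      (List.nodup_singleton s)
      (by
        intro x hx
        rw [List.mem_singleton] at hx
        exact hx ▸ Relation.ReflTransGen.refl)
      (fun x hx => hx) (List.mem_singleton_self s)
      (okB_bset vis hvisOk hs 1) hmark0
      (by
        intro x hx
        left
        exact hx)
  have hCfinb : ∀ z ∈ Cf, inb z := fun z hz => (reach_mem hs rfl ((hmem z).mp hz)).1
  have hbfs : bfs b vis s.1 s.2 cm =
      (if 3 ≤ PySem.Set.len Cf then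
        (PySem.Set.len Cf,
         if cm then Cf.foldl (fun bb x => bset bb x.1 x.2 0) b else b, vis')
      else (0, b, vis')) := by
    have hof : PySem.Set.ofList [(s.1, s.2)] = [s] := by
      rw [PySem.Set.ofList_eq_self_of_nodup _ (by simp), Prod.mk.eta]
    unfold bfs
    rw [if_neg (show ¬ bget b s.1 s.2 = 0 from by rw [hbs]; exact hnz)]
    dsimp only
    rw [hbs, hof, show ([(s.1, s.2)] : List (Int × Int)) = [s] from by rw [Prod.mk.eta], hloop]
  have hlen : PySem.Set.len Cf = (Cf.length : Int) := rfl
  rw [hbfs, hlen]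
  by_cases h3 : 3 ≤ Cf.length
  · rw [if_pos (show (3 : Int) ≤ (Cf.length : Int) from by exact_mod_cast h3)]
    by_cases hcm : cm = true
    · rw [if_pos hcm]
      obtain ⟨hokc, hagc⟩ := clear_fold Cf b hbOk hCfinb
      refine ⟨Cf, Cf.foldl (fun bb x => bset bb x.1 x.2 0) b, vis',
        ?_, hnd, hmem, hok', hmark', ?_, ?_⟩
      · rw [if_pos h3]
      · exact hokc
      · intro x hx hV hC
        rw [hagc x hx hC]
        exact hb x hx hV
    · rw [if_neg hcm]
      exact ⟨Cf, b, vis', by rw [if_pos h3], hnd, hmem, hok', hmark', hbOk,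
        fun x hx hV _ => hb x hx hV⟩
  · rw [if_neg (show ¬ (3 : Int) ≤ (Cf.length : Int) from by exact_mod_cast h3)]
    exact ⟨Cf, b, vis', by rw [if_neg h3], hnd, hmem, hok', hmark', hbOk,
      fun x hx hV _ => hb x hx hV⟩

-- the component size B assigns to a cell
def csize (bd : List (List Int)) (x : Int × Int) : Nat := (altRegion bd x.1 x.2).length

-- outer-loop invariant: U = the cells swallowed by earlier bfs calls
def OutInv (bd : List (List Int)) (st : List (List Int) × List (List Int) × Int)
    (U : List (Int × Int)) : Prop :=
  U.Nodup ∧ (∀ x ∈ U, inb x) ∧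
  (∀ x ∈ U, v0 bd x ≠ 0 ∧ ∀ y, reachP (v0 bd) (v0 bd x) x y → y ∈ U) ∧
  okB st.1 ∧ (∀ x : Int × Int, inb x → (bget st.1 x.1 x.2 = 0 ↔ x ∉ U)) ∧
  okB st.2.1 ∧ (∀ x : Int × Int, inb x → x ∉ U → bget st.2.1 x.1 x.2 = v0 bd x) ∧
  st.2.2 = ((U.filter (fun y => decide (3 ≤ csize bd y))).length : Int)

lemma filter_all_eq {p : (Int × Int) → Bool} (L : List (Int × Int)) (bv : Bool)
    (h : ∀ x ∈ L, p x = bv) : (L.filter p).length = if bv then L.length else 0 := by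
  cases bv with
  | true =>
    rw [if_pos rfl, List.filter_eq_self.mpr h]
  | false =>
    rw [if_neg (by simp)]
    rw [List.length_eq_zero_iff]
    rw [List.filter_eq_nil_iff]
    intro a ha
    rw [h a ha]
    simp

lemma csize_eq (bd : List (List Int)) {s y : Int × Int} (hs : inb s) (hy : inb y)
    (hr : reachP (v0 bd) (v0 bd s) s y) (Cf : List (Int × Int)) (hnd : Cf.Nodup)
    (hmem : ∀ x, x ∈ Cf ↔ reachP (v0 bd) (v0 bd s) s x) :
    csize bd y = Cf.length := by
  obtain ⟨hndy, hmy⟩ := altRegion_spec bd y hy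
  have hvy : v0 bd y = v0 bd s := (reach_mem hs rfl hr).2
  have hiff := reach_iff_of_reach hr
  apply List.Perm.length_eq
  rw [List.perm_ext_iff_of_nodup hndy hnd]
  intro a
  rw [hmy a, hmem a, hvy]
  exact hiff a

lemma outer_spec (bd : List (List Int)) (cm : Bool) :
    ∀ (R : List (Int × Int)), (∀ x ∈ R, inb x) →
    ∀ (st : List (List Int) × List (List Int) × Int) (U : List (Int × Int)),
      OutInv bd st U →
      ∃ U', OutInv bd (R.foldl (fun st x => visitCell cm st x.1 x.2) st) U' ∧
        (∀ x ∈ U, x ∈ U') ∧ (∀ x ∈ R, v0 bd x ≠ 0 → x ∈ U') ∧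
        (∀ x ∈ U', inb x ∧ v0 bd x ≠ 0) := by
  intro R
  induction R with
  | nil =>
    intro _ st U hInv
    exact ⟨U, hInv, fun x hx => hx, by simp, fun x hx => ⟨hInv.2.1 x hx, (hInv.2.2.1 x hx).1⟩⟩
  | cons z R ih =>
    intro hR st U hInv
    obtain ⟨hUnd, hUinb, hUcl, hvisOk, hvmark, hbOk, hbag, htot⟩ := hInv
    have hzinb : inb z := hR z (List.mem_cons_self ..)
    rw [List.foldl_cons]
    by_cases hzU : z ∈ U
    · -- already visited: visitCell is a no-op
      have hvc : visitCell cm st z.1 z.2 = st := by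
        rw [visitCell, if_neg]
        intro hc
        exact ((hvmark z hzinb).mp hc) hzU
      rw [hvc]
      obtain ⟨U', h1, h2, h3, h4⟩ := ih (fun x hx => hR x (List.mem_cons_of_mem _ hx)) st U
        ⟨hUnd, hUinb, hUcl, hvisOk, hvmark, hbOk, hbag, htot⟩
      refine ⟨U', h1, h2, ?_, h4⟩
      intro x hx hnz
      rcases List.mem_cons.mp hx with rfl | hx'
      · exact h2 x hzU
      · exact h3 x hx' hnz
    · have hvis0 : bget st.1 z.1 z.2 = 0 := (hvmark z hzinb).mpr hzU
      by_cases hz0 : v0 bd z = 0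
      · -- value 0: bfs returns immediately, nothing changes
        have hvc : visitCell cm st z.1 z.2 = st := by
          rw [visitCell, if_pos hvis0, bfs, if_pos (by rw [hbag z hzinb hzU]; exact hz0)]
          show (st.1, st.2.1, st.2.2 + 0) = st
          rw [add_zero]
        rw [hvc]
        obtain ⟨U', h1, h2, h3, h4⟩ := ih (fun x hx => hR x (List.mem_cons_of_mem _ hx)) st U
          ⟨hUnd, hUinb, hUcl, hvisOk, hvmark, hbOk, hbag, htot⟩
        refine ⟨U', h1, h2, ?_, h4⟩
        intro x hx hnz
        rcases List.mem_cons.mp hx with rfl | hx'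
        · exact absurd hz0 hnz
        · exact h3 x hx' hnz
      · -- fresh nonzero cell: run bfs, swallow its component
        have hdisj : ∀ x, reachP (v0 bd) (v0 bd z) z x → ¬ (x ∈ U) := by
          intro x hrx hxU
          have hvx : v0 bd x = v0 bd z := (reach_mem hzinb rfl hrx).2
          have : z ∈ U := by
            have hrzx : reachP (v0 bd) (v0 bd x) x z := by
              rw [hvx]
              exact reach_symmL hrx
            exact (hUcl x hxU).2 z hrzx
          exact hzU this
        obtain ⟨Cf, b', vis', hbfseq, hCnd, hCmem, hokv', hmark', hokb', hag'⟩ :=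
          bfs_spec bd st.2.1 st.1 (fun x => x ∈ U) z cm hvisOk hbOk
            (fun x hx => hvmark x hx) (fun x hx hV => hbag x hx hV) hzinb hzU hz0 hdisj
        have hCinb : ∀ x ∈ Cf, inb x := fun x hx => (reach_mem hzinb rfl ((hCmem x).mp hx)).1
        have hCdisj : ∀ x ∈ Cf, x ∉ U := fun x hx => hdisj x ((hCmem x).mp hx)
        have hvc : visitCell cm st z.1 z.2 =
            (vis', b', st.2.2 + (if 3 ≤ Cf.length then (Cf.length : Int) else 0)) := by
          rw [visitCell, if_pos hvis0, hbfseq]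
        rw [hvc]
        have hzCf : z ∈ Cf := (hCmem z).mpr Relation.ReflTransGen.refl
        -- the new swallowed set
        have hU'nd : (U ++ Cf).Nodup := by
          rw [List.nodup_append]
          refine ⟨hUnd, hCnd, ?_⟩
          intro a ha bb hbb hab
          exact hCdisj bb hbb (hab ▸ ha)
        have hU'inb : ∀ x ∈ U ++ Cf, inb x := by
          intro x hx
          rcases List.mem_append.mp hx with h | h
          exacts [hUinb x h, hCinb x h]
        have hU'cl : ∀ x ∈ U ++ Cf, v0 bd x ≠ 0 ∧
            ∀ y, reachP (v0 bd) (v0 bd x) x y → y ∈ U ++ Cf := by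
          intro x hx
          rcases List.mem_append.mp hx with h | h
          · obtain ⟨h1, h2⟩ := hUcl x h
            exact ⟨h1, fun y hy => List.mem_append.mpr (Or.inl (h2 y hy))⟩
          · have hrx := (hCmem x).mp h
            have hvx : v0 bd x = v0 bd z := (reach_mem hzinb rfl hrx).2
            refine ⟨by rw [hvx]; exact hz0, ?_⟩
            intro y hy
            rw [hvx] at hy
            exact List.mem_append.mpr
              (Or.inr ((hCmem y).mpr ((reach_iff_of_reach hrx y).mp hy)))
        have hmark'' : ∀ x : Int × Int, inb x →
            (bget vis' x.1 x.2 = 0 ↔ x ∉ U ++ Cf) := by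
          intro x hx
          rw [hmark' x hx]
          simp only [List.mem_append]
        have hag'' : ∀ x : Int × Int, inb x → x ∉ U ++ Cf → bget b' x.1 x.2 = v0 bd x := by
          intro x hx hxu
          simp only [List.mem_append, not_or] at hxu
          exact hag' x hx hxu.1 hxu.2
        have htot'' : st.2.2 + (if 3 ≤ Cf.length then (Cf.length : Int) else 0) =
            (((U ++ Cf).filter (fun y => decide (3 ≤ csize bd y))).length : Int) := by
          rw [htot, List.filter_append, List.length_append]
          by_cases h3 : 3 ≤ Cf.length
          · have hCsz : ∀ y ∈ Cf, (fun y => decide (3 ≤ csize bd y)) y = true := by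
              intro y hy
              have := csize_eq bd hzinb (hCinb y hy) ((hCmem y).mp hy) Cf hCnd hCmem
              simp [this, h3]
            rw [filter_all_eq Cf true hCsz, if_pos rfl, if_pos h3]
            push_cast
            ring
          · have hCsz : ∀ y ∈ Cf, (fun y => decide (3 ≤ csize bd y)) y = false := by
              intro y hy
              have := csize_eq bd hzinb (hCinb y hy) ((hCmem y).mp hy) Cf hCnd hCmem
              simp [this, h3]
            rw [if_neg h3, filter_all_eq Cf false hCsz,
                if_neg (show ¬ (false = true) from by simp)]
            simp
        obtain ⟨U', h1, h2, h3, h4⟩ := ih (fun x hx => hR x (List.mem_cons_of_mem _ hx))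
          (vis', b', st.2.2 + (if 3 ≤ Cf.length then (Cf.length : Int) else 0)) (U ++ Cf)
          ⟨hU'nd, hU'inb, hU'cl, hokv', hmark'', hokb', hag'', htot''⟩
        refine ⟨U', h1, ?_, ?_, h4⟩
        · intro x hx
          exact h2 x (List.mem_append.mpr (Or.inl hx))
        · intro x hx hnz
          rcases List.mem_cons.mp hx with rfl | hx'
          · exact h2 x (List.mem_append.mpr (Or.inr hzCf))
          · exact h3 x hx' hnz

-- ===== VERDICT (by name: the statement is the Claim_ definition above) =====
set_option maxHeartbeats 1000000 in
theorem count_clear_spec : Claim_equal_count_clear := by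
  intro board cm _ hpre
  unfold Spec_count_clear
  have hpre' : okB board := hpre
  have hvmap : (PySem.List.pyRange 0 5).map (fun _ => List.replicate 5 (0 : Int)) =
      [[0,0,0,0,0],[0,0,0,0,0],[0,0,0,0,0],[0,0,0,0,0],[0,0,0,0,0]] := by decide
  set visited0 : List (List Int) :=
    [[0,0,0,0,0],[0,0,0,0,0],[0,0,0,0,0],[0,0,0,0,0],[0,0,0,0,0]] with hv0
  have hvok : okB visited0 := by
    refine ⟨by simp [hv0], ?_⟩
    intro i hi
    interval_cases i <;> simp [hv0]
  have hvzero : ∀ x : Int × Int, inb x → bget visited0 x.1 x.2 = 0 := by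
    intro x hx
    obtain ⟨a, b⟩ := x
    obtain ⟨h1, h2, h3, h4⟩ := hx
    simp only at h1 h2 h3 h4
    rw [hv0]
    interval_cases a <;> interval_cases b <;> decide
  have hfold : count_clear board cm =
      (gridCells.foldl (fun st x => visitCell cm st x.1 x.2) (visited0, board, 0)).2.2 := by
    rw [count_clear, hvmap, gridCells, List.foldl_flatMap]
    simp only [List.foldl_map]
  have hinit : OutInv board (visited0, board, 0) [] := by
    refine ⟨List.nodup_nil, by simp, by simp, hvok, ?_, hpre', ?_, by simp⟩
    · intro x hx
      simp only [List.not_mem_nil, not_false_iff, iff_true]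
      exact hvzero x hx
    · intro x _ _
      rfl
  obtain ⟨U', hInv', _, hcover, hU'prop⟩ :=
    outer_spec board cm gridCells (fun x hx => (mem_gridCells x).mp hx)
      (visited0, board, 0) [] hinit
  obtain ⟨hU'nd, _, _, _, _, _, _, htotF⟩ := hInv'
  rw [hfold, htotF]
  have halt : count_clear_alt board cm =
      ((gridCells.filter (fun x =>
        decide (bget board x.1 x.2 ≠ 0) &&
        decide (3 ≤ PySem.Set.len (altRegion board x.1 x.2)))).length : Int) := rfl
  rw [halt]
  have hiff : ∀ y : Int × Int,
      (y ∈ U'.filter (fun y => decide (3 ≤ csize board y)) ↔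
       y ∈ gridCells.filter (fun x =>
        decide (bget board x.1 x.2 ≠ 0) &&
        decide (3 ≤ PySem.Set.len (altRegion board x.1 x.2)))) := by
    intro y
    simp only [List.mem_filter, mem_gridCells, decide_eq_true_eq, Bool.and_eq_true]
    have hlenregion : PySem.Set.len (altRegion board y.1 y.2) = ((csize board y : Nat) : Int) := rfl
    constructor
    · rintro ⟨hyU, hsz⟩
      obtain ⟨hyinb, hynz⟩ := hU'prop y hyU
      refine ⟨hyinb, ?_, ?_⟩
      · exact hynz
      · rw [hlenregion]
        exact_mod_cast hsz
    · rintro ⟨hyinb, hynz, hsz⟩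
      refine ⟨hcover y ((mem_gridCells y).mpr hyinb) hynz, ?_⟩
      rw [hlenregion] at hsz
      exact_mod_cast hsz
  have hperm := (List.perm_ext_iff_of_nodup (List.Nodup.filter _ hU'nd)
      (List.Nodup.filter _ nodup_gridCells)).mpr hiff
  rw [hperm.length_eq]
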